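-- pv_equiv track=rewrite | github.com/srhn225/RADiAnce | interaction/interaction_all.py | filter_cdr_interactions
-- ===== SOURCE A (Python) =====
-- def invert_interactions(interactions_dict):
--     inverted_dict = {}
--     for key, values in interactions_dict.items():
--         for target in values:
--             new_key = (target[0], target[1])
--             new_value = (key[0], key[1], target[2])
--
--             if new_key not in inverted_dict:
--                 inverted_dict[new_key] = []
--
--             inverted_dict[new_key].append(new_value)
--
--     return inverted_dict
--
-- class Chothia:
--     H1 = (26, 32)
--     H2 = (52, 56)
--     H3 = (95, 102)
--     L1 = (24, 34)
--     L2 = (50, 56)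
--     L3 = (89, 97)
--
-- def filter_cdr_interactions(all_interactions, selected_cdrs):
--     if selected_cdrs==[None]:
--         return invert_interactions(all_interactions)
--     cdr_mapping = {
--         'HCDR1': ('H', Chothia.H1),
--         'HCDR2': ('H', Chothia.H2),
--         'HCDR3': ('H', Chothia.H3),
--         'LCDR1': ('L', Chothia.L1),
--         'LCDR2': ('L', Chothia.L2),
--         'LCDR3': ('L', Chothia.L3)
--     }
--     invalid_cdrs = [cdr for cdr in selected_cdrs if cdr not in cdr_mapping]
--     if invalid_cdrs:
--         raise ValueError(f"Invalid CDR names: {invalid_cdrs}")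
--
--     filtered = {}
--     for (reschain, resnr), interactions in all_interactions.items():
--         for cdr_name in selected_cdrs:
--             chain_type, (start, end) = cdr_mapping[cdr_name]
--             if start <= resnr <= end:
--                 filtered[(reschain, resnr)] = interactions
--                 break
--     return filtered
-- ===== SOURCE B (Python) =====
-- def invert_interactions(interactions_dict):
--     inverted_dict = {}
--     for key, values in interactions_dict.items():
--         for target in values:
--             new_key = (target[0], target[1])
--             new_value = (key[0], key[1], target[2])
--
--             if new_key not in inverted_dict:
--                 inverted_dict[new_key] = []
--
--             inverted_dict[new_key].append(new_value)
--
--     return inverted_dict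
--
--
-- class Chothia:
--     H1 = (26, 32)
--     H2 = (52, 56)
--     H3 = (95, 102)
--     L1 = (24, 34)
--     L2 = (50, 56)
--     L3 = (89, 97)
--
--
-- _CDR_MAPPING = {
--     'HCDR1': ('H', Chothia.H1),
--     'HCDR2': ('H', Chothia.H2),
--     'HCDR3': ('H', Chothia.H3),
--     'LCDR1': ('L', Chothia.L1),
--     'LCDR2': ('L', Chothia.L2),
--     'LCDR3': ('L', Chothia.L3),
-- }
--
--
-- def filter_cdr_interactions(all_interactions, selected_cdrs):
--     if selected_cdrs == [None]:
--         return invert_interactions(all_interactions)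
--     invalid_cdrs = [cdr for cdr in selected_cdrs if cdr not in _CDR_MAPPING]
--     if invalid_cdrs:
--         raise ValueError(f"Invalid CDR names: {invalid_cdrs}")
--
--     valid_resnr = set()
--     for cdr_name in selected_cdrs:
--         _chain, (start, end) = _CDR_MAPPING[cdr_name]
--         valid_resnr.update(range(start, end + 1))
--
--     return {key: interactions
--             for key, interactions in all_interactions.items()
--             if key[1] in valid_resnr}
-- ===== Notes on version B (the rewrite author's own statement) =====
-- stated objective: simpler
-- what changed: Instead of A's per-entry inner loop that rescans the selected CDR ranges with a break, B precomputes one flat set of covered residue numbers from the selected CDRs and keeps entries with a single dict-comprehension membership pass; the [None] inversion branch and the validation are unchanged.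
import Mathlib
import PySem

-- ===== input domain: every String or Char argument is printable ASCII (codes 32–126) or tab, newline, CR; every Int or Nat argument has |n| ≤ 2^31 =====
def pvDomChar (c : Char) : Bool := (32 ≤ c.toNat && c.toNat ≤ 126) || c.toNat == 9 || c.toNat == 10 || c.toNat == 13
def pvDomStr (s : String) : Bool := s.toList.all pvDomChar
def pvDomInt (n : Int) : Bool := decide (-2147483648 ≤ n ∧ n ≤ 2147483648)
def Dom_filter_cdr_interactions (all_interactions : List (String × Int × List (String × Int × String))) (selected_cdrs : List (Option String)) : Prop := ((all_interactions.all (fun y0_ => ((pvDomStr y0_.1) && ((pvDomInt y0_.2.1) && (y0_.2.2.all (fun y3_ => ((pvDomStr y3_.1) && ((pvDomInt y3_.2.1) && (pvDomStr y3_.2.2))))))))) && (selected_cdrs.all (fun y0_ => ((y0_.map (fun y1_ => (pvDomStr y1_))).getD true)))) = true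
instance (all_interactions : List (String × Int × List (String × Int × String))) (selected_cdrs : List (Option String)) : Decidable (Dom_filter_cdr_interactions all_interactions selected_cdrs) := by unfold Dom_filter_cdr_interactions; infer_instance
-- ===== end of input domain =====

-- B replaces A's per-residue rescan of the CDR ranges with one precomputed set of covered
-- residue numbers and a single filtering pass (objective: simpler; not claimed faster).

-- ===== PORT A =====
-- module helper `invert_interactions`, used verbatim by both A and B on the [None] branch
def invertStep (d : PySem.Dict (String × Int) (List (String × Int × String)))
    (key : String × Int) (t : String × Int × String) :
    PySem.Dict (String × Int) (List (String × Int × String)) :=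
  let nk : String × Int := (t.1, t.2.1)
  let nv : String × Int × String := (key.1, key.2, t.2.2)
  -- `if new_key not in inverted_dict: inverted_dict[new_key] = []` then `.append(new_value)`
  let d1 := if d.contains nk then d else d.insert nk []
  d1.insert nk (d1.getD nk [] ++ [nv])

def invert_interactions (xs : List (String × Int × List (String × Int × String))) :
    List (String × Int × List (String × Int × String)) :=
  ((xs.foldl (fun d e => e.2.2.foldl (fun d t => invertStep d (e.1, e.2.1) t) d)
      (PySem.Dict.empty : PySem.Dict (String × Int) (List (String × Int × String)))).items).map
    (fun p => (p.1.1, p.1.2, p.2))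

-- cdr_mapping lookup ('H'/'L' chain type, (start, end) Chothia range); none = name not in the dict
def cdrMap (s : String) : Option (String × Int × Int) :=
  if s = "HCDR1" then some ("H", 26, 32)
  else if s = "HCDR2" then some ("H", 52, 56)
  else if s = "HCDR3" then some ("H", 95, 102)
  else if s = "LCDR1" then some ("L", 24, 34)
  else if s = "LCDR2" then some ("L", 50, 56)
  else if s = "LCDR3" then some ("L", 89, 97)
  else none

def isInvalidCdr (c : Option String) : Bool :=
  match c with
  | none => true
  | some s => (cdrMap s).isNone

-- A's inner `for cdr_name in selected_cdrs: … if start <= resnr <= end: …; break`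
def aInner (d : PySem.Dict (String × Int) (List (String × Int × String)))
    (reschain : String) (resnr : Int) (inter : List (String × Int × String)) :
    List (Option String) → PySem.Dict (String × Int) (List (String × Int × String))
  | [] => d
  | c :: rest =>
    match c with
    | some s =>
      match cdrMap s with
      | some (_, st, en) =>
        if st ≤ resnr ∧ resnr ≤ en then d.insert (reschain, resnr) inter
        else aInner d reschain resnr inter rest
      | none => d   -- KeyError; unreachable: the invalid_cdrs check already raised
    | none => d     -- KeyError; unreachable likewise

def filter_cdr_interactions (all_interactions : List (String × Int × List (String × Int × String))) (selected_cdrs : List (Option String)) : List (String × Int × List (String × Int × String)) :=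
  if selected_cdrs = [none] then invert_interactions all_interactions
  else if selected_cdrs.filter isInvalidCdr ≠ [] then []   -- ValueError; excluded by Pre_
  else
    ((all_interactions.foldl (fun d e => aInner d e.1 e.2.1 e.2.2 selected_cdrs)
        (PySem.Dict.empty : PySem.Dict (String × Int) (List (String × Int × String)))).items).map
      (fun p => (p.1.1, p.1.2, p.2))

-- ===== PORT B =====
-- `valid_resnr = set(); for cdr in selected: valid_resnr.update(range(start, end+1))`
def validSet (selected_cdrs : List (Option String)) : PySem.Set Int :=
  selected_cdrs.foldl (fun s c =>
    match c with
    | some nm =>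
      match cdrMap nm with
      | some (_, st, en) => PySem.Set.update s (PySem.List.pyRange st (en + 1) 1)
      | none => s
    | none => s) PySem.Set.empty

def filter_cdr_interactions_alt (all_interactions : List (String × Int × List (String × Int × String))) (selected_cdrs : List (Option String)) : List (String × Int × List (String × Int × String)) :=
  if selected_cdrs = [none] then invert_interactions all_interactions
  else if selected_cdrs.filter isInvalidCdr ≠ [] then []   -- ValueError; excluded by Pre_
  else
    let valid := validSet selected_cdrs
    -- dict comprehension `{key: v for key, v in items if key[1] in valid_resnr}`
    (((all_interactions.filter (fun e => PySem.Set.contains valid e.2.1)).foldl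
        (fun d e => d.insert (e.1, e.2.1) e.2.2)
        (PySem.Dict.empty : PySem.Dict (String × Int) (List (String × Int × String)))).items).map
      (fun p => (p.1.1, p.1.2, p.2))

-- ===== PRECONDITION & SPEC =====
-- Pre_ excludes (a) assoc lists whose keys repeat — a Python dict argument cannot hold
-- duplicate keys, so those lists represent no actual input — and (b) selections (other than
-- exactly [None]) containing a name outside the six CDR names, on which A raises ValueError.
def Pre_filter_cdr_interactions (all_interactions : List (String × Int × List (String × Int × String))) (selected_cdrs : List (Option String)) : Prop :=
  (all_interactions.map (fun e => (e.1, e.2.1))).Nodup ∧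
  (selected_cdrs = [none] ∨
    ∀ c ∈ selected_cdrs,
      c ∈ [some "HCDR1", some "HCDR2", some "HCDR3", some "LCDR1", some "LCDR2", some "LCDR3"])
instance (all_interactions : List (String × Int × List (String × Int × String))) (selected_cdrs : List (Option String)) : Decidable (Pre_filter_cdr_interactions all_interactions selected_cdrs) := by unfold Pre_filter_cdr_interactions; infer_instance

def pvWitness_filter_cdr_interactions : (List (String × Int × List (String × Int × String))) × List (Option String) :=
  ([("A", 27, [("X", 3, "hb")]), ("A", 60, [])], [some "HCDR1", some "LCDR3"])

def Spec_filter_cdr_interactions (all_interactions : List (String × Int × List (String × Int × String))) (selected_cdrs : List (Option String)) (out : List (String × Int × List (String × Int × String))) : Prop := out = filter_cdr_interactions_alt all_interactions selected_cdrs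
instance (all_interactions : List (String × Int × List (String × Int × String))) (selected_cdrs : List (Option String)) (out : List (String × Int × List (String × Int × String))) : Decidable (Spec_filter_cdr_interactions all_interactions selected_cdrs out) := by unfold Spec_filter_cdr_interactions; infer_instance

-- ===== CLAIM (what is proved, stated in full; the proofs are below) =====
def Claim_equal_filter_cdr_interactions : Prop := ∀ (all_interactions : List (String × Int × List (String × Int × String))) (selected_cdrs : List (Option String)), Dom_filter_cdr_interactions all_interactions selected_cdrs → Pre_filter_cdr_interactions all_interactions selected_cdrs → Spec_filter_cdr_interactions all_interactions selected_cdrs (filter_cdr_interactions all_interactions selected_cdrs)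

-- ===== LEMMAS AND PROOFS =====

-- the inner-loop condition of A, as a single boolean over the selection
def coveredBy (selected_cdrs : List (Option String)) (resnr : Int) : Bool :=
  selected_cdrs.any (fun c =>
    match c with
    | some s =>
      match cdrMap s with
      | some (_, st, en) => decide (st ≤ resnr ∧ resnr ≤ en)
      | none => false
    | none => false)

lemma aInner_eq_ite (d : PySem.Dict (String × Int) (List (String × Int × String)))
    (ch : String) (nr : Int) (iv : List (String × Int × String))
    (sel : List (Option String)) (hv : ∀ c ∈ sel, isInvalidCdr c = false) :
    aInner d ch nr iv sel = if coveredBy sel nr then d.insert (ch, nr) iv else d := by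
  induction sel with
  | nil => simp [aInner, coveredBy]
  | cons c rest ih =>
    have hc := hv c (List.mem_cons_self ..)
    have hrest : ∀ x ∈ rest, isInvalidCdr x = false := fun x hx => hv x (List.mem_cons_of_mem _ hx)
    cases c with
    | none => simp [isInvalidCdr] at hc
    | some s =>
      cases hm : cdrMap s with
      | none => simp [isInvalidCdr, hm] at hc
      | some v =>
        obtain ⟨ct, st, en⟩ := v
        by_cases hin : st ≤ nr ∧ nr ≤ en
        · simp [aInner, hm, hin, coveredBy]
        · simp only [aInner, hm, if_neg hin, ih hrest]
          have : coveredBy (some s :: rest) nr = coveredBy rest nr := by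
            simp [coveredBy, hm, hin]
          rw [this]

lemma mem_validSet_aux (sel : List (Option String)) (s : PySem.Set Int) (nr : Int) :
    (nr ∈ sel.foldl (fun s c =>
      match c with
      | some nm =>
        match cdrMap nm with
        | some (_, st, en) => PySem.Set.update s (PySem.List.pyRange st (en + 1) 1)
        | none => s
      | none => s) s) ↔ (nr ∈ s ∨ coveredBy sel nr = true) := by
  induction sel generalizing s with
  | nil => simp [coveredBy]
  | cons c rest ih =>
    cases c with
    | none =>
      rw [List.foldl_cons, ih]
      simp [coveredBy]
    | some nm =>
      cases hm : cdrMap nm with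
      | none =>
        rw [List.foldl_cons]
        simp only [hm, ih]
        simp [coveredBy, hm]
      | some v =>
        obtain ⟨ct, st, en⟩ := v
        rw [List.foldl_cons]
        simp only [hm, ih]
        rw [PySem.Set.mem_update]
        have hrng : nr ∈ PySem.List.pyRange st (en + 1) 1 ↔ st ≤ nr ∧ nr ≤ en := by
          rw [PySem.List.mem_pyRange_one]; omega
        simp only [hrng, coveredBy, List.any_cons, hm]
        by_cases hin : st ≤ nr ∧ nr ≤ en
        · simp [hin]
        · simp [hin]

lemma contains_validSet (sel : List (Option String)) (nr : Int) :
    PySem.Set.contains (validSet sel) nr = coveredBy sel nr := by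
  have h : nr ∈ validSet sel ↔ coveredBy sel nr = true := by
    unfold validSet
    rw [mem_validSet_aux]
    simp [PySem.Set.empty]
  rw [Bool.eq_iff_iff, PySem.Set.contains_iff]
  exact h

lemma valid_of_mem_names (c : Option String)
    (hc : c ∈ [some "HCDR1", some "HCDR2", some "HCDR3", some "LCDR1", some "LCDR2", some "LCDR3"]) :
    isInvalidCdr c = false := by
  fin_cases hc <;> decide

-- ===== VERDICT (by name: the statement is the Claim_ definition above) =====
theorem filter_cdr_interactions_spec : Claim_equal_filter_cdr_interactions := by
  intro ai sel _hDom hPre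
  unfold Spec_filter_cdr_interactions
  obtain ⟨_hnd, hsel⟩ := hPre
  by_cases h1 : sel = [none]
  · simp [filter_cdr_interactions, filter_cdr_interactions_alt, h1]
  · rcases hsel with h | hnames
    · exact absurd h h1
    have hv : ∀ c ∈ sel, isInvalidCdr c = false := fun c hc => valid_of_mem_names c (hnames c hc)
    have hfil : sel.filter isInvalidCdr = [] := by
      rw [List.filter_eq_nil_iff]; intro c hc; simp [hv c hc]
    simp only [filter_cdr_interactions, filter_cdr_interactions_alt, if_neg h1, hfil]
    simp only [ne_eq, not_true_eq_false, if_false]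
    suffices hd : ai.foldl (fun d e => aInner d e.1 e.2.1 e.2.2 sel) PySem.Dict.empty
        = (ai.filter (fun e => PySem.Set.contains (validSet sel) e.2.1)).foldl
            (fun d e => d.insert (e.1, e.2.1) e.2.2) PySem.Dict.empty by
      rw [hd]
    have hstep : ∀ (d : PySem.Dict (String × Int) (List (String × Int × String)))
        (e : String × Int × List (String × Int × String)),
        aInner d e.1 e.2.1 e.2.2 sel
          = if PySem.Set.contains (validSet sel) e.2.1 then d.insert (e.1, e.2.1) e.2.2 else d := by
      intro d e
      rw [aInner_eq_ite d e.1 e.2.1 e.2.2 sel hv, contains_validSet]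
    calc ai.foldl (fun d e => aInner d e.1 e.2.1 e.2.2 sel) PySem.Dict.empty
        = ai.foldl (fun d e => if PySem.Set.contains (validSet sel) e.2.1
            then d.insert (e.1, e.2.1) e.2.2 else d) PySem.Dict.empty := by
          apply List.foldl_ext
          intro d e _
          exact hstep d e
      _ = (ai.filter (fun e => PySem.Set.contains (validSet sel) e.2.1)).foldl
            (fun d e => d.insert (e.1, e.2.1) e.2.2) PySem.Dict.empty := by
          rw [List.foldl_filter]
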